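-- pv_equiv track=rewrite | github.com/OctaviaOZ/Python_trainee | tasks01.py | kthTerm
-- ===== SOURCE A (Python) =====
-- def kthTerm(n, k):
--
--     # Constraints
--     if n < 2 or n > 30 or k < 1 or k > 100:
--         return 0
--
--     seq_integers = []
--
--     for p in range(k):
--
--         number_power = n ** p
--         seq_integers.append(number_power)
--
--         len_list = len(seq_integers)
--         if len_list == k:
--             break
--
--         last_item = min(k - len_list, len_list - 1)
--
--         seq_integers += [item + number_power for item in seq_integers[:last_item]]
--
--         if len(seq_integers) >= k:
--             break
--
--     return seq_integers[k - 1]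
-- ===== SOURCE B (Python) =====
-- def kthTerm(n, k):
--     # Constraints (same guard as the original)
--     if n < 2 or n > 30 or k < 1 or k > 100:
--         return 0
--     # the k-th term is the sum of the powers of n selected by the bits of k
--     result = 0
--     power = 1
--     kk = k
--     while kk > 0:
--         if kk & 1:
--             result += power
--         power *= n
--         kk >>= 1
--     return result
-- ===== Notes on version B (the rewrite author's own statement) =====
-- stated objective: simpler
-- what changed: Replaces the incremental list-doubling construction (build prefix sums, index k-1) by a direct closed-form bit loop: the k-th term is the sum of the powers of n selected by the binary digits of k, so no list is built at all.
import Mathlib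
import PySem

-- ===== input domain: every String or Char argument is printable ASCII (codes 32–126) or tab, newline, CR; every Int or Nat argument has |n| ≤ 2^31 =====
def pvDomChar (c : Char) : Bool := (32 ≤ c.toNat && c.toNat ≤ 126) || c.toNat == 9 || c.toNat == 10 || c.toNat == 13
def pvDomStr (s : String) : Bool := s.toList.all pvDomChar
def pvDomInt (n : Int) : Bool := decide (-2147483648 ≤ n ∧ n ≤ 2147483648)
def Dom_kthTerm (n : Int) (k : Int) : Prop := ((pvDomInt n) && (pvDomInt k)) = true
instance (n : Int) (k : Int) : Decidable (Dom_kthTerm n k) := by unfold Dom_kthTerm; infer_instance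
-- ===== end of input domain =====

-- B replaces A's incremental list construction with a direct bit-of-k loop (simpler, no list built).
-- ===== PORT A =====
-- the for-p-in-range(k) loop with its two breaks; state = seq_integers
def kthTermLoop (ps : List Int) (n : Int) (k : Int) (seq : List Int) : List Int :=
  match ps with
  | [] => seq
  | p :: ps' =>
    let number_power := n ^ p.toNat   -- n ** p; p comes from range(k), so p ≥ 0
    let seq := seq ++ [number_power]
    let len_list : Int := seq.length
    if len_list = k then seq
    else
      let last_item := min (k - len_list) (len_list - 1)
      let seq := seq ++ (PySem.List.slice seq none (some last_item)).map (fun item => item + number_power)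
      if (seq.length : Int) ≥ k then seq else kthTermLoop ps' n k seq

def kthTerm (n : Int) (k : Int) : Int :=
  if n < 2 ∨ n > 30 ∨ k < 1 ∨ k > 100 then 0
  else
    -- seq_integers[k-1]; under the guard the index is always in range (proved below:
    -- the loop result has length ≥ k), so the .getD 0 default branch is never taken
    (PySem.List.pyGet? (kthTermLoop (PySem.List.pyRange 0 k 1) n k []) (k - 1)).getD 0

-- ===== PORT B =====
-- while kk > 0: if kk & 1: result += power; power *= n; kk >>= 1
-- fuel = the initial kk, which bounds the halving loop, so the recursion is structural
def kthTermBits (fuel : Nat) (kk : Nat) (result : Int) (power : Int) (n : Int) : Int :=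
  match fuel with
  | 0 => result
  | fuel + 1 =>
    if kk = 0 then result
    else kthTermBits fuel (kk / 2) (if kk % 2 = 1 then result + power else result) (power * n) n

def kthTerm_alt (n : Int) (k : Int) : Int :=
  if n < 2 ∨ n > 30 ∨ k < 1 ∨ k > 100 then 0
  else kthTermBits k.toNat k.toNat 0 1 n

-- ===== PRECONDITION & SPEC =====
def Spec_kthTerm (n : Int) (k : Int) (out : Int) : Prop := out = kthTerm_alt n k
instance (n : Int) (k : Int) (out : Int) : Decidable (Spec_kthTerm n k out) := by unfold Spec_kthTerm; infer_instance

-- ===== CLAIM (what is proved, stated in full; the proofs are below) =====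
def Claim_equal_kthTerm : Prop := ∀ (n : Int) (k : Int), Dom_kthTerm n k → Spec_kthTerm n k (kthTerm n k)

-- ===== LEMMAS AND PROOFS =====

-- the value of the binary digits of m with digit i weighted by n^i (Horner form)
def gbin (n : Int) : Nat → Int
  | 0 => 0
  | m + 1 => n * gbin n ((m + 1) / 2) + (((m + 1) % 2 : Nat) : Int)
  decreasing_by omega

lemma gbin_zero (n : Int) : gbin n 0 = 0 := by rw [gbin]

lemma gbin_eq (n : Int) (m : Nat) : gbin n m = n * gbin n (m / 2) + ((m % 2 : Nat) : Int) := by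
  cases m with
  | zero => simp [gbin]
  | succ m => rw [gbin]

-- adding a power of two beyond all set bits adds the corresponding power of n
lemma gbin_two_pow_add (n : Int) : ∀ (p i : Nat), i < 2 ^ p → gbin n (2 ^ p + i) = n ^ p + gbin n i := by
  intro p
  induction p with
  | zero =>
    intro i hi
    interval_cases i
    rw [gbin_eq]
    simp [gbin_zero]
  | succ p ih =>
    intro i hi
    have h2 : 2 ^ (p + 1) = 2 * 2 ^ p := by ring
    have hdiv : (2 ^ (p + 1) + i) / 2 = 2 ^ p + i / 2 := by omega
    have hmod : (2 ^ (p + 1) + i) % 2 = i % 2 := by omega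
    rw [gbin_eq n (2 ^ (p + 1) + i), hdiv, hmod, ih (i / 2) (by omega), gbin_eq n i]
    push_cast
    ring

lemma gbin_two_pow (n : Int) (p : Nat) : gbin n (2 ^ p) = n ^ p := by
  have h := gbin_two_pow_add n p 0 (by positivity)
  simpa [gbin_zero] using h

-- the first L terms of the sequence: term j (0-based) is gbin (j+1)
def Sfun (n : Int) (L : Nat) : List Int := (List.range L).map (fun j => gbin n (j + 1))

lemma Sfun_length (n : Int) (L : Nat) : (Sfun n L).length = L := by simp [Sfun]

lemma Sfun_snoc (n : Int) (L : Nat) : Sfun n L ++ [gbin n (L + 1)] = Sfun n (L + 1) := by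
  simp [Sfun, List.range_succ]

lemma Sfun_take (n : Int) (t L : Nat) (h : t ≤ L) : (Sfun n L).take t = Sfun n t := by
  unfold Sfun
  rw [← List.map_take, List.take_range, Nat.min_eq_left h]

lemma Sfun_append (n : Int) (p t : Nat) (h : t ≤ 2 ^ p - 1) :
    Sfun n (2 ^ p) ++ (Sfun n t).map (fun item => item + n ^ p) = Sfun n (2 ^ p + t) := by
  unfold Sfun
  rw [List.range_add, List.map_append, List.map_map, List.map_map]
  congr 1
  apply List.map_congr_left
  intro j hj
  have hj' : j < t := List.mem_range.mp hj
  have h1 : 1 ≤ (2:Nat) ^ p := Nat.one_le_two_pow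
  simp only [Function.comp_apply]
  rw [show 2 ^ p + j + 1 = 2 ^ p + (j + 1) by omega,
    gbin_two_pow_add n p (j + 1) (by omega)]
  ring

-- core invariant of A's loop: entered at step p holding the first (2^p - 1) terms,
-- it returns the first M terms for some M ≥ k
lemma loopA (n k : Int) : ∀ (d : Nat) (p : Int), 0 ≤ p → p + (d : Int) = k →
    ((2 : Int) ^ p.toNat - 1 < k) →
    ∃ M : Nat, k ≤ (M : Int) ∧
      kthTermLoop (PySem.List.pyRange p k 1) n k (Sfun n (2 ^ p.toNat - 1)) = Sfun n M := by
  intro d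
  induction d with
  | zero =>
    intro p hp hpk hlt
    exfalso
    have h1 : p.toNat < 2 ^ p.toNat := Nat.lt_two_pow_self
    have h2 : ((2:Int) ^ p.toNat) = ((2 ^ p.toNat : Nat) : Int) := by push_cast; ring
    omega
  | succ d ih =>
    intro p hp hpk hlt
    have hpklt : p < k := by omega
    have h2c : ((2:Int) ^ p.toNat) = ((2 ^ p.toNat : Nat) : Int) := by push_cast; ring
    have h1p : 1 ≤ (2:Nat) ^ p.toNat := Nat.one_le_two_pow
    have hsnoc : Sfun n (2 ^ p.toNat - 1) ++ [n ^ p.toNat] = Sfun n (2 ^ p.toNat) := by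
      have hL : (2:Nat) ^ p.toNat - 1 + 1 = 2 ^ p.toNat := by omega
      have hg : gbin n ((2 ^ p.toNat - 1) + 1) = n ^ p.toNat := by rw [hL, gbin_two_pow]
      rw [← hg, Sfun_snoc, hL]
    rw [PySem.List.pyRange_one_cons hpklt]
    simp only [kthTermLoop]
    rw [hsnoc, Sfun_length]
    by_cases hk2 : ((2 ^ p.toNat : Nat) : Int) = k
    · rw [if_pos hk2]
      exact ⟨2 ^ p.toNat, le_of_eq hk2.symm, rfl⟩
    · rw [if_neg hk2]
      have h2k : ((2 ^ p.toNat : Nat) : Int) < k := by omega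
      set t : Nat := min (k - ((2 ^ p.toNat : Nat) : Int)).toNat (2 ^ p.toNat - 1) with htdef
      have ht : min (k - ((2 ^ p.toNat : Nat) : Int)) (((2 ^ p.toNat : Nat) : Int) - 1) = (t : Int) := by
        rw [htdef]; push_cast; omega
      rw [ht, PySem.List.slice_to_natCast, Sfun_take n t (2 ^ p.toNat) (by omega),
        Sfun_append n p.toNat t (by omega), Sfun_length]
      by_cases hge : (((2 ^ p.toNat + t : Nat) : Int)) ≥ k
      · rw [if_pos hge]
        exact ⟨2 ^ p.toNat + t, hge, rfl⟩
      · rw [if_neg hge]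
        have hc2 : ((2 ^ p.toNat + t : Nat) : Int) < k := by omega
        have ht2 : t = 2 ^ p.toNat - 1 := by
          rw [htdef] at hc2 ⊢
          push_cast at hc2
          omega
        have hp1 : (p + 1).toNat = p.toNat + 1 := by omega
        have h2s : (2:Nat) ^ (p.toNat + 1) = 2 * 2 ^ p.toNat := by ring
        have harg : (2:Nat) ^ ((p + 1).toNat) - 1 = 2 ^ p.toNat + t := by
          rw [hp1, h2s]; omega
        have h2c' : ((2:Int) ^ (p + 1).toNat) = (((2:Nat) ^ (p + 1).toNat : Nat) : Int) := by push_cast; ring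
        have hrec := ih (p + 1) (by omega) (by push_cast at hpk ⊢; omega)
          (by rw [h2c']; push_cast [harg]; push_cast at hc2; omega)
        rw [← harg]
        exact hrec

-- B's bit loop computes gbin
lemma bits_eq (n : Int) : ∀ (fuel kk : Nat), kk < 2 ^ fuel → ∀ (r p : Int),
    kthTermBits fuel kk r p n = r + p * gbin n kk := by
  intro fuel
  induction fuel with
  | zero =>
    intro kk hkk r p
    have h0 : kk = 0 := by omega
    subst h0
    simp [kthTermBits, gbin_zero]
  | succ fuel ih =>
    intro kk hkk r p
    by_cases h0 : kk = 0
    · subst h0; simp [kthTermBits, gbin_zero]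
    · have hlt : kk / 2 < 2 ^ fuel := by
        have : 2 ^ (fuel + 1) = 2 * 2 ^ fuel := by ring
        omega
      rw [kthTermBits]
      simp only [h0, if_false]
      rw [ih (kk / 2) hlt, gbin_eq n kk]
      rcases Nat.mod_two_eq_zero_or_one kk with h | h <;> rw [h] <;> simp <;> ring

-- ===== VERDICT (by name: the statement is the Claim_ definition above) =====
theorem kthTerm_spec : Claim_equal_kthTerm := by
  intro n k _
  unfold Spec_kthTerm kthTerm kthTerm_alt
  by_cases h : n < 2 ∨ n > 30 ∨ k < 1 ∨ k > 100
  · rw [if_pos h, if_pos h]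
  · rw [if_neg h, if_neg h]
    have hk1 : 1 ≤ k := by omega
    obtain ⟨M, hM, hloop⟩ := loopA n k k.toNat 0 le_rfl (by omega) (by norm_num; omega)
    have h0 : ([] : List Int) = Sfun n (2 ^ ((0:Int).toNat) - 1) := by simp [Sfun]
    rw [h0, hloop, PySem.List.pyGet?_of_nonneg (Sfun n M) (i := k - 1) (by omega)]
    have hidx : (k - 1).toNat < M := by omega
    have hget : (Sfun n M)[(k - 1).toNat]? = some (gbin n ((k - 1).toNat + 1)) := by
      unfold Sfun
      rw [List.getElem?_map, List.getElem?_range hidx, Option.map_some]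
    rw [hget]
    have hk' : (k - 1).toNat + 1 = k.toNat := by omega
    rw [Option.getD_some, hk', bits_eq n k.toNat k.toNat Nat.lt_two_pow_self 0 1]
    ring
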